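-- pv_equiv track=rewrite | github.com/KMORaza/Rosetta-Code-Challenges | Rosetta Code Challenges/FactorOfMersenneNumber.py | find_factor_of_mersenne_prime
-- ===== SOURCE A (Python) =====
-- def mod_pow(base, exponent, modulus):
--     result = 1
--     base = base % modulus
--     while exponent > 0:
--         if exponent % 2 == 1:
--             result = (result * base) % modulus
--         exponent = exponent >> 1
--         base = (base * base) % modulus
--     return result
--
-- def find_factor_of_mersenne_prime(P):
--     exponent = P
--     modulus = 2 ** P - 1
--     for k in range(1, P):
--         potential_factor = 2 * k * P + 1
--         if mod_pow(2, exponent, potential_factor) == 1: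
--             return potential_factor
--     return None
-- ===== SOURCE B (Python) =====
-- def find_factor_of_mersenne_prime(P):
--     m = 2 ** P - 1
--     for k in range(1, P):
--         q = 2 * k * P + 1
--         if m % q == 0:
--             return q
--     return None
-- ===== Notes on version B (the rewrite author's own statement) =====
-- stated objective: simpler
-- what changed: Replaced the iterative square-and-multiply modular exponentiation helper with a direct divisibility test of the (already computed) Mersenne number against each candidate, deleting mod_pow entirely.
import Mathlib
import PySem

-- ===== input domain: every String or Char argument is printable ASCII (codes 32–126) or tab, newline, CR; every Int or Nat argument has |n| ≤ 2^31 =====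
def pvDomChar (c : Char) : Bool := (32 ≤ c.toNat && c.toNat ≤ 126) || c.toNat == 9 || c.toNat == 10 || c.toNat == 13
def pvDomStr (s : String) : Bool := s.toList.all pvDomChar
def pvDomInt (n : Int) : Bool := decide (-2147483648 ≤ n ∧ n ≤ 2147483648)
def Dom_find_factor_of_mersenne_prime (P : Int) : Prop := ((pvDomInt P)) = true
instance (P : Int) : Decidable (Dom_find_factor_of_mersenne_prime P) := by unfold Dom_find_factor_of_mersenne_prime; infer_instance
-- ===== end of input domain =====

-- ===== PORT A =====
-- B drops the square-and-multiply modular-exponentiation helper for one direct big-integer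
-- divisibility test per candidate; objective: simpler.

-- mod_pow's while-loop: recursion on exponent (Python '>> 1' is floor division by 2)
def mod_pow_loop (result base exponent modulus : Int) : Int :=
  if _h : exponent > 0 then
    mod_pow_loop
      (if PySem.Int.mod exponent 2 = 1 then PySem.Int.mod (result * base) modulus else result)
      (PySem.Int.mod (base * base) modulus)
      (PySem.Int.floordiv exponent 2) modulus
  else result
termination_by exponent.toNat
decreasing_by
  have h2 : PySem.Int.floordiv exponent 2 = exponent / 2 :=
    PySem.Int.floordiv_eq_ediv_of_pos (by omega)
  rw [h2]; omega

def mod_pow (base exponent modulus : Int) : Int :=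
  mod_pow_loop 1 (PySem.Int.mod base modulus) exponent modulus

-- A's for-loop over range(1, P) with early return
def ffLoopA (P : Int) : List Int → Option Int
  | [] => none
  | k :: ks =>
    let potential_factor := 2 * k * P + 1
    if mod_pow 2 P potential_factor = 1 then some potential_factor else ffLoopA P ks

def find_factor_of_mersenne_prime (P : Int) : Option Int :=
  -- Python also binds 'modulus = 2 ** P - 1' here; it is never used (mod_pow is called with
  -- potential_factor as modulus), so the dead binding is omitted.
  ffLoopA P (PySem.List.pyRange 1 P 1)

-- ===== PORT B =====
-- B's for-loop: first candidate q = 2kP+1 dividing m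
def ffLoopB (m P : Int) : List Int → Option Int
  | [] => none
  | k :: ks =>
    let q := 2 * k * P + 1
    if PySem.Int.mod m q = 0 then some q else ffLoopB m P ks

def find_factor_of_mersenne_prime_alt (P : Int) : Option Int :=
  -- 'm = 2 ** P - 1': for P < 0 Python produces a float here, but m is only read inside the
  -- loop, which runs only when P ≥ 2; the toNat rendering is exact on every executed path.
  let m : Int := 2 ^ P.toNat - 1
  ffLoopB m P (PySem.List.pyRange 1 P 1)

-- ===== PRECONDITION & SPEC =====
def Spec_find_factor_of_mersenne_prime (P : Int) (out : Option Int) : Prop := out = find_factor_of_mersenne_prime_alt P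
instance (P : Int) (out : Option Int) : Decidable (Spec_find_factor_of_mersenne_prime P out) := by unfold Spec_find_factor_of_mersenne_prime; infer_instance

-- ===== CLAIM (what is proved, stated in full; the proofs are below) =====
def Claim_equal_find_factor_of_mersenne_prime : Prop := ∀ (P : Int), Dom_find_factor_of_mersenne_prime P → Spec_find_factor_of_mersenne_prime P (find_factor_of_mersenne_prime P)

-- ===== LEMMAS AND PROOFS =====

-- invariant of mod_pow's while-loop
lemma mod_pow_loop_eq (modulus : Int) (hm : 1 < modulus) :
    ∀ (e : Int) (result base : Int), 0 ≤ result → result < modulus →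
      mod_pow_loop result base e modulus = (result * base ^ e.toNat) % modulus := by
  have hm0 : (0:Int) < modulus := by omega
  have hmne : modulus ≠ 0 := by omega
  intro e
  by_cases he : 0 ≤ e
  · lift e to Nat using he with n
    induction n using Nat.strong_induction_on with
    | _ n ih =>
      intro result base hr0 hr
      rcases Nat.eq_zero_or_pos n with h0 | hpos
      · subst h0
        rw [mod_pow_loop]
        norm_num [Int.emod_eq_of_lt hr0 hr]
      · rw [mod_pow_loop]
        rw [dif_pos (by exact_mod_cast hpos)]
        have hmod2 : PySem.Int.mod (n:Int) 2 = ((n % 2 : Nat) : Int) := by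
          rw [PySem.Int.mod_eq_emod_of_pos (by norm_num)]; push_cast; rfl
        have hdiv2 : PySem.Int.floordiv (n:Int) 2 = ((n / 2 : Nat) : Int) := by
          rw [PySem.Int.floordiv_eq_ediv_of_pos (by norm_num)]; push_cast; rfl
        rw [hmod2, hdiv2, PySem.Int.mod_eq_emod_of_pos hm0, PySem.Int.mod_eq_emod_of_pos hm0]
        have ihh := ih (n / 2) (Nat.div_lt_self hpos (by norm_num))
        have key : ∀ r : Int, 0 ≤ r → r < modulus →
            mod_pow_loop r ((base * base) % modulus) ((n / 2 : Nat) : Int) modulus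
              = r * (base * base) ^ (n / 2) % modulus := by
          intro r h0 h1
          rw [ihh r ((base*base) % modulus) h0 h1, Int.toNat_natCast]
          exact (Int.ModEq.refl r).mul
            (Int.ModEq.pow _ (Int.emod_emod_of_dvd (base * base) dvd_rfl))
        rcases Nat.even_or_odd n with heven | hodd
        · have hne : ¬ (((n % 2 : Nat) : Int) = 1) := by
            have : n % 2 = 0 := Nat.even_iff.1 heven
            simp [this]
          rw [if_neg hne, key result hr0 hr]
          have hn : n = 2 * (n / 2) := by omega
          congr 1
          conv_rhs => rw [Int.toNat_natCast, hn]
          rw [pow_mul]; ring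
        · have hyes : (((n % 2 : Nat) : Int) = 1) := by
            have : n % 2 = 1 := Nat.odd_iff.1 hodd
            simp [this]
          rw [if_pos hyes,
              key ((result * base) % modulus) (Int.emod_nonneg _ hmne) (Int.emod_lt_of_pos _ hm0)]
          rw [Int.mul_emod, Int.emod_emod_of_dvd _ dvd_rfl, ← Int.mul_emod]
          have hn : n = 2 * (n / 2) + 1 := by
            have := Nat.odd_iff.1 hodd; omega
          congr 1
          conv_rhs => rw [Int.toNat_natCast, hn]
          rw [pow_succ, pow_mul]; ring
  · intro result base hr0 hr
    rw [mod_pow_loop]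
    simp only [dif_neg (by omega : ¬ (e > 0))]
    rw [Int.toNat_of_nonpos (by omega), pow_zero, mul_one, Int.emod_eq_of_lt hr0 hr]

-- mod_pow 2 P q computes 2^P mod q
lemma mod_pow_eq (P q : Int) (hq : 1 < q) :
    mod_pow 2 P q = 2 ^ P.toNat % q := by
  unfold mod_pow
  rw [mod_pow_loop_eq q hq P 1 _ (by norm_num) hq, one_mul,
      PySem.Int.mod_eq_emod_of_pos (by omega)]
  exact Int.ModEq.pow _ (Int.emod_emod_of_dvd 2 dvd_rfl)

-- the two loops agree element by element
lemma loops_eq (P : Int) (hP : 2 ≤ P) (l : List Int) (hl : ∀ k ∈ l, 1 ≤ k) :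
    ffLoopA P l = ffLoopB (2 ^ P.toNat - 1) P l := by
  induction l with
  | nil => rfl
  | cons k ks ih =>
    have hk : 1 ≤ k := hl k (List.mem_cons_self ..)
    have hq : (1:Int) < 2 * k * P + 1 := by nlinarith
    show (if mod_pow 2 P (2*k*P+1) = 1 then some (2*k*P+1) else ffLoopA P ks)
       = (if PySem.Int.mod (2 ^ P.toNat - 1) (2*k*P+1) = 0 then some (2*k*P+1)
          else ffLoopB (2 ^ P.toNat - 1) P ks)
    have hcond : (mod_pow 2 P (2*k*P+1) = 1)
        ↔ (PySem.Int.mod (2 ^ P.toNat - 1) (2*k*P+1) = 0) := by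
      rw [mod_pow_eq P _ hq, PySem.Int.mod_eq_emod_of_pos (by omega),
          ← Int.emod_eq_emod_iff_emod_sub_eq_zero,
          Int.emod_eq_of_lt (by norm_num) hq]
    split_ifs with h1 h2 h2
    · rfl
    · exact absurd (hcond.1 h1) h2
    · exact absurd (hcond.2 h2) h1
    · exact ih (fun x hx => hl x (List.mem_cons_of_mem _ hx))

-- ===== VERDICT (by name: the statement is the Claim_ definition above) =====
theorem find_factor_of_mersenne_prime_spec : Claim_equal_find_factor_of_mersenne_prime := by
  intro P _
  unfold Spec_find_factor_of_mersenne_prime find_factor_of_mersenne_prime find_factor_of_mersenne_prime_alt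
  by_cases hP : 2 ≤ P
  · exact loops_eq P hP _ (by intro k hk; exact ((PySem.List.mem_pyRange_one).1 hk).1)
  · rw [PySem.List.pyRange_one_eq_nil (by omega)]; rfl
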